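-- pv_equiv track=rewrite | github.com/stevejtrettel/lifting-modp | py/numbertheory-old.py | discfac
-- ===== SOURCE A (Python) =====
-- def discfac(d):
--     if d == 0:
--         return (0,0)
--     elif d % 4 > 1:
--         return (d,1)
--     m = 1
--     s = d//abs(d)
--     d*=s
--     while d % 4 == 0:
--         m*=2
--         d = d//4
--     while d % 9 == 0:
--         m*=3
--         d = d//9
--     r = 5
--     e = -1
--     while r*r <= d:
--         r2 = r*r
--         while d % r2 == 0:
--             d = d//r2
--             m*=r
--         r+=3+e
--         e*=-1
--     d*=s
--     if d % 4 > 1: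
--         return d*4, m//2
--     else:
--         return d, m
-- ===== SOURCE B (Python) =====
-- def discfac(d):
--     if d == 0:
--         return (0, 0)
--     if d % 4 > 1:
--         return (d, 1)
--     s = -1 if d < 0 else 1
--     n = abs(d)
--     m = 1
--     k = 2
--     while k * k <= n:
--         if n % (k * k) == 0:
--             m = k
--         k += 1
--     rem = s * (n // (m * m))
--     if rem % 4 > 1:
--         return (rem * 4, m // 2)
--     return (rem, m)
-- ===== Notes on version B (the rewrite author's own statement) =====
-- stated objective: simpler
-- what changed: A strips square factors inline (repeatedly dividing out 4, 9, then r*r over a 6k±1 wheel while accumulating the multiplier); B instead finds the largest k with k*k dividing |d| by one plain upward scan and derives the remainder by a single division, with the same two guards and the same final mod-4 fix-up.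
import Mathlib
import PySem

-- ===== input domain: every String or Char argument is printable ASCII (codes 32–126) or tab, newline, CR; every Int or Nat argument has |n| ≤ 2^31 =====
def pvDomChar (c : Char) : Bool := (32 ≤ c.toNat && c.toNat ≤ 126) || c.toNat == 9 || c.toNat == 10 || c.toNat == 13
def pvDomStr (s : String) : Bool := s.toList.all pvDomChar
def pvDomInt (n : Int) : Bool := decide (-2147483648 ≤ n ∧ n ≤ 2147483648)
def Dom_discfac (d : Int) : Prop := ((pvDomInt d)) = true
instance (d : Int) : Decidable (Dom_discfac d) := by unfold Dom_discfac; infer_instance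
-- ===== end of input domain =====

-- B replaces A's inline square-stripping (4, 9, then a 6k±1 wheel of squares) by one plain
-- upward scan that keeps the largest k with k*k dividing |d|; objective: simpler.

-- ===== PORT A =====
-- A's inner 'while d % q == 0: d //= q; m *= r' loops (q is 4, 9 or r*r).
-- The '2 ≤ q ∧ 1 ≤ d' part of the guard only makes the loop total (Python diverges outside it).
-- (cited by pvStrip's decreasing_by)
theorem pvStrip_dec (q d : Int) (hq : 2 ≤ q) (hd : 1 ≤ d) :
    (PySem.Int.floordiv d q).toNat < d.toNat := by
  rw [PySem.Int.floordiv_eq_ediv_of_pos (by omega)]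
  have h1 : d / q < d := by
    rw [Int.ediv_lt_iff_lt_mul (by omega)]; nlinarith
  have h2 : 0 ≤ d / q := Int.ediv_nonneg (by omega) (by omega)
  omega
def pvStrip (q r d m : Int) : Int × Int :=
  if h : 2 ≤ q ∧ 1 ≤ d ∧ PySem.Int.mod d q = 0 then
    pvStrip q r (PySem.Int.floordiv d q) (m * r)
  else (d, m)
termination_by d.toNat
decreasing_by exact pvStrip_dec q d h.1 h.2.1

-- bound on the stripped value, cited by pvWheel's decreasing_by
theorem pvStrip_le (q r d m : Int) (hq : 2 ≤ q) :
    1 ≤ d → 1 ≤ (pvStrip q r d m).1 ∧ (pvStrip q r d m).1 ≤ d := by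
  induction d, m using pvStrip.induct q r with
  | case1 d m h ih =>
    intro hd
    have hmod := h.2.2
    have hdvd : q ∣ d := (PySem.Int.mod_eq_zero_iff_dvd d q).mp hmod
    have hfd : PySem.Int.floordiv d q = d / q := PySem.Int.floordiv_eq_ediv_of_pos (by omega)
    have h1 : 1 ≤ d / q := by
      rcases hdvd with ⟨c, rfl⟩
      rw [Int.mul_ediv_cancel_left _ (by omega)]; nlinarith
    have h2 : d / q ≤ d := Int.ediv_le_self _ (by omega)
    rw [pvStrip, dif_pos h]
    have := ih (by rw [hfd]; exact h1)
    refine ⟨this.1, le_trans this.2 ?_⟩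
    rw [hfd]; exact h2
  | case2 d m h =>
    intro hd
    rw [pvStrip, dif_neg h]
    exact ⟨hd, le_refl d⟩

-- A's outer 'while r*r <= d' wheel loop.  The '5 ≤ r ∧ 1 ≤ d ∧ e = ±1' part of the guard only
-- makes the loop total (it holds at every call A performs; Python diverges outside it).
-- (cited by pvWheel's decreasing_by)
theorem pvWheel_dec (r e d m : Int) (h1 : r * r ≤ d) (h2 : 5 ≤ r) (h3 : 1 ≤ d)
    (h4 : e = -1 ∨ e = 1) :
    ((pvStrip (r * r) r d m).1 - (r + 3 + e)).toNat < (d - r).toNat := by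
  have hb := pvStrip_le (r * r) r d m (by nlinarith) h3
  have h25 : 5 * r ≤ r * r := by nlinarith
  omega
def pvWheel (r e d m : Int) : Int × Int :=
  if h : r * r ≤ d ∧ 5 ≤ r ∧ 1 ≤ d ∧ (e = -1 ∨ e = 1) then
    let p := pvStrip (r * r) r d m
    pvWheel (r + 3 + e) (-e) p.1 p.2
  else (d, m)
termination_by (d - r).toNat
decreasing_by exact pvWheel_dec r e d m h.1 h.2.1 h.2.2.1 h.2.2.2

def discfac (d : Int) : Int × Int :=
  if d = 0 then (0, 0)
  else if 1 < PySem.Int.mod d 4 then (d, 1)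
  else
    let m : Int := 1
    let s : Int := PySem.Int.floordiv d |d|
    let d1 := d * s
    let p1 := pvStrip 4 2 d1 m
    let p2 := pvStrip 9 3 p1.1 p1.2
    let p3 := pvWheel 5 (-1) p2.1 p2.2
    let d2 := p3.1 * s
    if 1 < PySem.Int.mod d2 4 then (d2 * 4, PySem.Int.floordiv p3.2 2) else (d2, p3.2)

-- ===== PORT B =====
-- B's single 'while k*k <= n' scan keeping the last k with k*k | n.
-- The '2 ≤ k' part of the guard only makes the loop total (k starts at 2 and increases).
-- (cited by pvScan's decreasing_by)
theorem pvScan_dec (n k : Int) (h1 : k * k ≤ n) (h2 : 2 ≤ k) :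
    (n - (k + 1)).toNat < (n - k).toNat := by
  have : 2 * k ≤ k * k := by nlinarith
  omega
def pvScan (n k m : Int) : Int :=
  if h : k * k ≤ n ∧ 2 ≤ k then
    pvScan n (k + 1) (if PySem.Int.mod n (k * k) = 0 then k else m)
  else m
termination_by (n - k).toNat
decreasing_by exact pvScan_dec n k h.1 h.2

def discfac_alt (d : Int) : Int × Int :=
  if d = 0 then (0, 0)
  else if 1 < PySem.Int.mod d 4 then (d, 1)
  else
    let s : Int := if d < 0 then -1 else 1
    let n := |d|
    let m := pvScan n 2 1
    let rem := s * PySem.Int.floordiv n (m * m)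
    if 1 < PySem.Int.mod rem 4 then (rem * 4, PySem.Int.floordiv m 2) else (rem, m)

-- ===== PRECONDITION & SPEC =====
def Spec_discfac (d : Int) (out : Int × Int) : Prop := out = discfac_alt d
instance (d : Int) (out : Int × Int) : Decidable (Spec_discfac d out) := by unfold Spec_discfac; infer_instance

-- ===== CLAIM (what is proved, stated in full; the proofs are below) =====
def Claim_equal_discfac : Prop := ∀ (d : Int), Dom_discfac d → Spec_discfac d (discfac d)

-- ===== LEMMAS AND PROOFS =====

-- A's stripping loop divides out q as often as possible, multiplying r onto m each time
theorem pvStrip_spec (q r d m : Int) (hq : 2 ≤ q) :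
    1 ≤ d → ∃ (j : ℕ) (d' : Int), pvStrip q r d m = (d', m * r ^ j) ∧
      d = d' * q ^ j ∧ ¬ q ∣ d' ∧ 1 ≤ d' := by
  induction d, m using pvStrip.induct q r with
  | case1 d m h ih =>
    intro hd
    have hmod := h.2.2
    have hdvd : q ∣ d := (PySem.Int.mod_eq_zero_iff_dvd d q).mp hmod
    have hfd : PySem.Int.floordiv d q = d / q := PySem.Int.floordiv_eq_ediv_of_pos (by omega)
    have h1 : 1 ≤ d / q := by
      rcases hdvd with ⟨c, hc⟩
      rw [hc, Int.mul_ediv_cancel_left _ (by omega)]; nlinarith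
    obtain ⟨j, d', heq, hprod, hnd, hd'⟩ := ih (by rw [hfd]; exact h1)
    refine ⟨j + 1, d', ?_, ?_, hnd, hd'⟩
    · rw [pvStrip, dif_pos h, heq]
      ring_nf
    · have : d = d / q * q := (Int.ediv_mul_cancel hdvd).symm
      rw [hfd] at hprod
      rw [this, hprod]; ring
  | case2 d m h =>
    intro hd
    refine ⟨0, d, ?_, by ring, ?_, hd⟩
    · rw [pvStrip, dif_neg h]; ring_nf
    · intro hdvd
      exact h ⟨hq, hd, (PySem.Int.mod_eq_zero_iff_dvd d q).mpr hdvd⟩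

-- A's wheel loop: under its invariant it returns (d', m*c) with d = d'*c², d' free of square factors
theorem pvWheel_spec (r e d m : Int) :
    5 ≤ r → 1 ≤ d → ((e = -1 ∧ r % 6 = 5) ∨ (e = 1 ∧ r % 6 = 1)) →
    ¬ (4 : Int) ∣ d → ¬ (9 : Int) ∣ d →
    (∀ p : Int, 5 ≤ p → p < r → (p % 6 = 1 ∨ p % 6 = 5) → ¬ p * p ∣ d) →
    ∃ (c d' : Int), pvWheel r e d m = (d', m * c) ∧ d = d' * (c * c) ∧
      1 ≤ d' ∧ 1 ≤ c ∧ (∀ k : Int, 2 ≤ k → ¬ k * k ∣ d') := by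
  induction r, e, d, m using pvWheel.induct with
  | case1 r e d m h p ih =>
    intro hr hd he h4 h9 hinv
    simp only [p] at ih
    have hrr := h.1
    obtain ⟨j, d1, hseq, hprod, hnd, hd1⟩ := pvStrip_spec (r * r) r d m (by nlinarith) hd
    rw [hseq] at ih
    dsimp only at ih
    have hd1dvd : d1 ∣ d := ⟨(r * r) ^ j, hprod⟩
    have hrj : (1 : Int) ≤ r ^ j := by
      have : (0 : Int) < r ^ j := pow_pos (by omega) j
      omega
    obtain ⟨c', d', hweq, hprod', hd', hc', hsf⟩ :=
      ih (by omega) hd1 (by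
          rcases he with ⟨he, hr6⟩ | ⟨he, hr6⟩
          · right; omega
          · left; omega)
        (fun hh => h4 (dvd_trans hh hd1dvd)) (fun hh => h9 (dvd_trans hh hd1dvd))
        (fun p hp5 hpr hp6 hpp => by
          rcases lt_trichotomy p r with hlt | heq | hgt
          · exact hinv p hp5 hlt hp6 (dvd_trans hpp hd1dvd)
          · exact hnd (heq ▸ hpp)
          · -- r < p < r + 3 + e: p has residue 0,2,3,4 mod 6
            rcases he with ⟨he, hr6⟩ | ⟨he, hr6⟩ <;> omega)
    refine ⟨r ^ j * c', d', ?_, ?_, hd', by nlinarith, hsf⟩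
    · rw [pvWheel, dif_pos h]
      simp only [hseq]
      rw [hweq]; ring_nf
    · rw [hprod, hprod', mul_pow]; ring
  | case2 r e d m h =>
    intro hr hd he h4 h9 hinv
    rw [pvWheel, dif_neg h]
    have hrr : d < r * r := by
      rcases not_and_or.mp h with h1 | h2
      · omega
      · exfalso; apply h2; exact ⟨by omega, by omega, by rcases he with ⟨he,_⟩|⟨he,_⟩ <;> omega⟩
    refine ⟨1, d, by ring_nf, by ring, hd, le_refl 1, fun k hk hkk => ?_⟩
    -- k*k | d, k ≥ 2: derive contradiction
    have hkd : k * k ≤ d := Int.le_of_dvd (by omega) hkk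
    have hkr : k < r := by nlinarith
    by_cases h2 : (2 : Int) ∣ k
    · rcases h2 with ⟨t, rfl⟩
      exact h4 (dvd_trans ⟨t * t, by ring⟩ hkk)
    · by_cases h3 : (3 : Int) ∣ k
      · rcases h3 with ⟨t, rfl⟩
        exact h9 (dvd_trans ⟨t * t, by ring⟩ hkk)
      · have hk6 : k % 6 = 1 ∨ k % 6 = 5 := by omega
        have hk5 : 5 ≤ k := by omega
        exact hinv k hk5 hkr hk6 hkk

-- B's scan returns the largest k with k*k dividing n
theorem pvScan_spec (n k m : Int) :
    1 ≤ n → 2 ≤ k → 1 ≤ m → m * m ∣ n →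
    (∀ j : Int, 2 ≤ j → j < k → j * j ∣ n → j ≤ m) →
    1 ≤ pvScan n k m ∧ pvScan n k m * pvScan n k m ∣ n ∧
      (∀ j : Int, 2 ≤ j → j * j ∣ n → j ≤ pvScan n k m) := by
  induction k, m using pvScan.induct n with
  | case1 k m h ih =>
    intro hn hk hm hmm hinv
    rw [pvScan, dif_pos h]
    by_cases hc : PySem.Int.mod n (k * k) = 0
    · rw [if_pos hc]; rw [dif_pos hc] at ih
      have hdvd : k * k ∣ n := (PySem.Int.mod_eq_zero_iff_dvd n (k * k)).mp hc
      exact ih hn (by omega) (by omega) hdvd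
        (fun j h2 hjk hjj => by omega)
    · rw [if_neg hc]; rw [dif_neg hc] at ih
      refine ih hn (by omega) hm hmm (fun j h2 hjk hjj => ?_)
      rcases lt_or_eq_of_le (Int.lt_add_one_iff.mp hjk) with hlt | heq
      · exact hinv j h2 hlt hjj
      · exact absurd ((PySem.Int.mod_eq_zero_iff_dvd n (k * k)).mpr (heq ▸ hjj)) hc
  | case2 k m h =>
    intro hn hk hm hmm hinv
    rw [pvScan, dif_neg h]
    have hkk : n < k * k := by
      rcases not_and_or.mp h with h1 | h2
      · omega
      · omega
    refine ⟨hm, hmm, fun j h2 hjj => ?_⟩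
    by_cases hjk : j < k
    · exact hinv j h2 hjk hjj
    · exfalso
      have : k * k ≤ j * j := by nlinarith
      have : j * j ≤ n := Int.le_of_dvd (by omega) hjj
      omega

-- uniqueness: if n = a*m² with a free of square factors, every k with k² | n divides m (ℕ form)
theorem sq_dvd_nat (a m k : ℕ) (hm : 1 ≤ m) (hk : 1 ≤ k)
    (hsf : ∀ j : ℕ, 2 ≤ j → ¬ j * j ∣ a) (hdvd : k * k ∣ a * (m * m)) : k ∣ m := by
  set g := Nat.gcd k m with hg
  have hgpos : 0 < g := Nat.gcd_pos_of_pos_left m (by omega)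
  set k' := k / g with hk'
  set m' := m / g with hm'
  have hkg : k = g * k' := (Nat.mul_div_cancel' (Nat.gcd_dvd_left k m)).symm
  have hmg : m = g * m' := (Nat.mul_div_cancel' (Nat.gcd_dvd_right k m)).symm
  have hco : Nat.Coprime k' m' := Nat.coprime_div_gcd_div_gcd hgpos
  have hgm : g ∣ m := Nat.gcd_dvd_right k m
  clear_value g k' m'
  have hcancel : k' * k' ∣ a * (m' * m') := by
    have h1 : (g * g) * (k' * k') ∣ (g * g) * (a * (m' * m')) := by
      calc (g * g) * (k' * k') = k * k := by rw [hkg]; ring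
      _ ∣ a * (m * m) := hdvd
      _ = (g * g) * (a * (m' * m')) := by rw [hmg]; ring
    exact (mul_dvd_mul_iff_left (by positivity : 0 < g * g).ne').mp h1
  have hcop2 : Nat.Coprime (k' * k') (m' * m') := (hco.mul hco).mul_right ((hco.mul hco))
  have hk'a : k' * k' ∣ a := hcop2.dvd_of_dvd_mul_right hcancel
  have hk1 : k' = 1 := by
    by_contra hne
    have h0 : k' ≠ 0 := by
      intro h0; rw [h0, Nat.mul_zero] at hkg; omega
    exact hsf k' (by omega) hk'a
  rw [hkg, hk1, Nat.mul_one]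
  exact hgm

theorem sq_dvd_int (a m k : ℤ) (ha : 1 ≤ a) (hm : 1 ≤ m) (hk : 1 ≤ k)
    (hsf : ∀ j : ℤ, 2 ≤ j → ¬ j * j ∣ a) (hdvd : k * k ∣ a * (m * m)) : k ∣ m := by
  have hnat : k.toNat ∣ m.toNat := by
    apply sq_dvd_nat a.toNat m.toNat k.toNat (by omega) (by omega)
    · intro j hj hjd
      apply hsf (j : ℤ) (by omega)
      have : ((j * j : ℕ) : ℤ) ∣ ((a.toNat : ℕ) : ℤ) := Int.natCast_dvd_natCast.mpr hjd
      push_cast at this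
      rwa [Int.toNat_of_nonneg (by omega)] at this
    · have : ((k.toNat * k.toNat : ℕ) : ℤ) ∣ ((a.toNat * (m.toNat * m.toNat) : ℕ) : ℤ) := by
        push_cast
        rw [Int.toNat_of_nonneg (by omega : (0:ℤ) ≤ k), Int.toNat_of_nonneg (by omega : (0:ℤ) ≤ a),
          Int.toNat_of_nonneg (by omega : (0:ℤ) ≤ m)]
        exact hdvd
      exact Int.natCast_dvd_natCast.mp this
  have := Int.natCast_dvd_natCast.mpr hnat
  rwa [Int.toNat_of_nonneg (by omega : (0:ℤ) ≤ k), Int.toNat_of_nonneg (by omega : (0:ℤ) ≤ m)] at this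

-- the two ports agree on every input
theorem discfac_main (d : Int) : discfac d = discfac_alt d := by
  by_cases hd0 : d = 0
  · simp [discfac, discfac_alt, hd0]
  by_cases hm4 : 1 < PySem.Int.mod d 4
  · rw [discfac, discfac_alt, if_neg hd0, if_neg hd0, if_pos hm4, if_pos hm4]
  -- main path
  have habs : 0 < |d| := abs_pos.mpr hd0
  have hs : PySem.Int.floordiv d |d| = (if d < 0 then (-1 : ℤ) else 1) := by
    rw [PySem.Int.floordiv_eq_ediv_of_pos habs]
    rcases lt_or_gt_of_ne hd0 with hneg | hpos
    · rw [if_pos hneg, abs_of_neg hneg, Int.ediv_neg, Int.ediv_self hd0]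
    · rw [if_neg (by omega), abs_of_pos hpos, Int.ediv_self hd0]
  have hds : d * (if d < 0 then (-1 : ℤ) else 1) = |d| := by
    rcases lt_or_gt_of_ne hd0 with hneg | hpos
    · rw [if_pos hneg, abs_of_neg hneg]; ring
    · rw [if_neg (by omega), abs_of_pos hpos]; ring
  set n := |d| with hn
  obtain ⟨j2, a1, hs1, hp1, hnd1, ha1⟩ := pvStrip_spec 4 2 n 1 (by omega) (by omega)
  obtain ⟨j3, a2, hs2, hp2, hnd2, ha2⟩ := pvStrip_spec 9 3 a1 (1 * 2 ^ j2) (by omega) ha1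
  have ha2a1 : a2 ∣ a1 := ⟨9 ^ j3, hp2⟩
  obtain ⟨c, d', hw, hp3, hd', hc, hsf⟩ :=
    pvWheel_spec 5 (-1) a2 (1 * 2 ^ j2 * 3 ^ j3) (by omega) ha2
      (by left; constructor <;> decide)
      (fun hh => hnd1 (dvd_trans hh ha2a1)) hnd2
      (fun p hp5 hpr hp6 hpp => by omega)
  set M : Int := 1 * 2 ^ j2 * 3 ^ j3 * c with hM
  have h2j : (0:ℤ) < 2 ^ j2 := pow_pos (by omega) _
  have h3j : (0:ℤ) < 3 ^ j3 := pow_pos (by omega) _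
  have e2 : (1:ℤ) ≤ 2 ^ j2 := by omega
  have e3 : (1:ℤ) ≤ 3 ^ j3 := by omega
  have hM1 : 1 ≤ M := by
    rw [hM]
    nlinarith [mul_le_mul e2 e3 (by omega : (0:ℤ) ≤ 1) (by omega : (0:ℤ) ≤ 2 ^ j2)]
  have hnM : n = d' * (M * M) := by
    rw [hp1, hp2, hp3, hM, show (4:ℤ) = 2 * 2 from rfl, show (9:ℤ) = 3 * 3 from rfl,
      mul_pow, mul_pow]
    ring
  obtain ⟨hMb1, hMbdvd, hMbmax⟩ := pvScan_spec n 2 1 (by omega) (by omega) (by omega)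
    (by simpa using one_dvd n) (fun j h2 hjk hjj => by omega)
  set Mb : Int := pvScan n 2 1 with hMb
  have hMM : M = Mb := by
    have hMdvd : M * M ∣ n := ⟨d', by rw [hnM]; ring⟩
    have hle1 : M ≤ Mb := by
      by_cases h2M : 2 ≤ M
      · exact hMbmax M h2M hMdvd
      · omega
    have hdvd2 : Mb ∣ M := sq_dvd_int d' M Mb hd' hM1 hMb1 hsf (by rw [← hnM]; exact hMbdvd)
    have hle2 : Mb ≤ M := Int.le_of_dvd (by omega) hdvd2
    omega
  have hrem : PySem.Int.floordiv n (Mb * Mb) = d' := by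
    rw [PySem.Int.floordiv_eq_ediv_of_pos (mul_pos (by omega) (by omega)), hnM, hMM, Int.mul_ediv_cancel _ (by nlinarith)]
  -- assemble
  rw [discfac, discfac_alt, if_neg hd0, if_neg hd0, if_neg hm4, if_neg hm4]
  have hrem' : PySem.Int.floordiv n (M * M) = d' := by rw [hMM]; exact hrem
  simp only [hs, hds, ← hn, hs1, hs2, hw, ← hMb, ← hMM, hrem']
  rw [mul_comm d' (if d < 0 then (-1:ℤ) else 1)]

-- ===== VERDICT (by name: the statement is the Claim_ definition above) =====
theorem discfac_spec : Claim_equal_discfac := by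
  intro d _
  show discfac d = discfac_alt d
  exact discfac_main d
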